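-- pv_equiv track=rewrite | github.com/ririnto/pdf-ocr | pdf_streamer.py | select_pages
-- ===== SOURCE A (Python) =====
-- from typing import Iterable, Iterator, List, Tuple, Optional
--
-- def select_pages(
--         total_pages: int,
--         page_range: Optional[str] = None,
--         pages: Optional[str] = None,
--         step: int = 1
-- ) -> List[int]:
--     """
--     Compute selected 0-based page indices.
--
--     :param total_pages: Total number of pages.
--     :param page_range: Inclusive 1-based range like ``"10-50"``.
--     :param pages: Comma-separated 1-based list like ``"1,5,9"``.
--     :param step: Sampling interval.
--     :return: Sorted indices.
--     """
--     chosen: set[int] = set()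
--     if page_range:
--         a, b = page_range.split("-")
--         start = max(1, int(a))
--         end = int(b)
--         chosen.update(range(start - 1, end))
--     if pages:
--         for tok in pages.split(','):
--             tok = tok.strip()
--             if tok:
--                 chosen.add(max(0, int(tok) - 1))
--     if not page_range and not pages:
--         chosen.update(range(total_pages))
--     idx = sorted(i for i in chosen if 0 <= i < total_pages)
--     if step > 1:
--         idx = idx[::step]
--     return idx
-- ===== SOURCE B (Python) =====
-- def select_pages(total_pages, page_range=None, pages=None, step=1):
--     if not page_range and not pages:
--         idx = list(range(max(0, total_pages)))
--     else:
--         lo = hi = 0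
--         if page_range:
--             a, b = page_range.split("-")
--             lo = max(0, max(1, int(a)) - 1)
--             hi = max(lo, min(total_pages, int(b)))
--         vals = []
--         if pages:
--             for tok in pages.split(','):
--                 tok = tok.strip()
--                 if tok:
--                     vals.append(max(0, int(tok) - 1))
--         vals.sort()
--         before, after = [], []
--         for v in vals:
--             if 0 <= v < total_pages:
--                 if v < lo and v not in before:
--                     before.append(v)
--                 elif v >= hi and v not in after:
--                     after.append(v)
--         idx = before + list(range(lo, hi)) + after
--     if step > 1:
--         idx = idx[::step]
--     return idx
-- ===== Notes on version B (the rewrite author's own statement) =====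
-- stated objective: alternative
-- what changed: B drops A's single set accumulating every selected index followed by a global sort: it clips the page_range spec to one interval, sorts and dedups only the parsed page tokens, and splices them before/after the interval, emitting the result already in order.
import Mathlib
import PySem

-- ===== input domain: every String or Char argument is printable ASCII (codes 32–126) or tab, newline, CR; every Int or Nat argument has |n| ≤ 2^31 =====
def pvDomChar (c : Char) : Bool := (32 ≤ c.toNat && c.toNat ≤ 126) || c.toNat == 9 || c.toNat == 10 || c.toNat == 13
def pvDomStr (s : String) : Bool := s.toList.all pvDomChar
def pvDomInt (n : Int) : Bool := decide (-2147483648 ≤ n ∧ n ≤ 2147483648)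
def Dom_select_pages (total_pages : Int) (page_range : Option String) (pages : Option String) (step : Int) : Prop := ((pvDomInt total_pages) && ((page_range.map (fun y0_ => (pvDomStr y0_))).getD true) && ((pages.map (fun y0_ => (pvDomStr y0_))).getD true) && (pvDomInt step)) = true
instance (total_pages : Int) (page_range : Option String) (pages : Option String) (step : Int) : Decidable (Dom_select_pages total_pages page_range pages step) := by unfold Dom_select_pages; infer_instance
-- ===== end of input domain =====

-- B replaces A's "accumulate one set of all indices, filter, sort" with a merge: it clips the
-- range spec to one interval, sorts and dedups only the token values, and splices them around
-- the interval — no global set and no sort of the full selection (objective 'alternative').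

-- ===== PORT A =====
-- s.split(sep) for a nonempty literal sep (split? returns none only for sep = "", unreachable here)
def pvSplit (s sep : String) : List String := (PySem.Str.split? s sep).getD []

-- step 1: 'if page_range: a, b = page_range.split("-"); chosen.update(range(max(1,int(a))-1, int(b)))'
-- (branches where the unpack or int() would raise are excluded by Pre_ and return chosen unchanged)
def pvAddRange (chosen : PySem.Set Int) (prS : String) : PySem.Set Int :=
  if prS = "" then chosen else
    match pvSplit prS "-" with
    | [a, b] =>
      match PySem.Int.ofStr? a, PySem.Int.ofStr? b with
      | some av, some bv => PySem.Set.update chosen (PySem.List.pyRange (max 1 av - 1) bv 1)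
      | _, _ => chosen
    | _ => chosen

-- body of the 'for tok in pages.split(",")' loop
def pvStepA (ch : PySem.Set Int) (tok : String) : PySem.Set Int :=
  let t := PySem.Str.strip tok
  if t = "" then ch else
    match PySem.Int.ofStr? t with
    | some v => PySem.Set.add ch (max 0 (v - 1))
    | none => ch

-- step 2: 'if pages: for tok in pages.split(","): …'
def pvAddPages (chosen : PySem.Set Int) (pgS : String) : PySem.Set Int :=
  if pgS = "" then chosen else (pvSplit pgS ",").foldl pvStepA chosen

def select_pages (total_pages : Int) (page_range : Option String) (pages : Option String) (step : Int) : List Int :=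
  let prS := page_range.getD ""
  let pgS := pages.getD ""
  let chosen := pvAddPages (pvAddRange PySem.Set.empty prS) pgS
  let chosen := if prS = "" ∧ pgS = "" then PySem.Set.update chosen (PySem.List.pyRange 0 total_pages 1) else chosen
  let idx := PySem.List.sorted (chosen.filter (fun i => decide (0 ≤ i) && decide (i < total_pages))) (fun x => x) false
  if step > 1 then (PySem.List.slice? idx none none step).getD [] else idx

-- ===== PORT B =====
-- 'lo = hi = 0; if page_range: … lo = max(0, max(1, int(a)) - 1); hi = max(lo, min(total_pages, int(b)))'
def pvLoHi (prS : String) (tp : Int) : Int × Int :=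
  if prS = "" then (0, 0) else
    match pvSplit prS "-" with
    | [a, b] =>
      match PySem.Int.ofStr? a, PySem.Int.ofStr? b with
      | some av, some bv =>
        let lo := max 0 (max 1 av - 1)
        (lo, max lo (min tp bv))
      | _, _ => (0, 0)
    | _ => (0, 0)

-- body of B's token loop: 'vals.append(max(0, int(tok) - 1))'
def pvStepB (acc : List Int) (tok : String) : List Int :=
  let t := PySem.Str.strip tok
  if t = "" then acc else
    match PySem.Int.ofStr? t with
    | some v => acc ++ [max 0 (v - 1)]
    | none => acc

-- 'vals = []; if pages: for tok in pages.split(","): …'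
def pvExtra (pgS : String) : List Int :=
  if pgS = "" then [] else (pvSplit pgS ",").foldl pvStepB []

-- body of B's 'for v in vals' loop over state (before, after)
def pvStepSplit (tp lo hi : Int) (st : List Int × List Int) (v : Int) : List Int × List Int :=
  if 0 ≤ v ∧ v < tp then
    if v < lo ∧ st.1.contains v = false then (st.1 ++ [v], st.2)
    else if hi ≤ v ∧ st.2.contains v = false then (st.1, st.2 ++ [v])
    else st
  else st

def select_pages_alt (total_pages : Int) (page_range : Option String) (pages : Option String) (step : Int) : List Int :=
  let prS := page_range.getD ""
  let pgS := pages.getD ""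
  let idx :=
    if prS = "" ∧ pgS = "" then PySem.List.pyRange 0 (max 0 total_pages) 1
    else
      let lh := pvLoHi prS total_pages
      let vals := PySem.List.sorted (pvExtra pgS) (fun x => x) false
      let ba := vals.foldl (pvStepSplit total_pages lh.1 lh.2) ([], [])
      ba.1 ++ PySem.List.pyRange lh.1 lh.2 1 ++ ba.2
  if step > 1 then (PySem.List.slice? idx none none step).getD [] else idx

-- ===== PRECONDITION & SPEC =====
-- Pre_ excludes exactly the inputs where Python A raises: a truthy page_range whose split("-")
-- is not an unpackable pair or whose parts are not int()-parsable, and a truthy pages with a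
-- nonempty stripped token that is not int()-parsable.
def Pre_select_pages (total_pages : Int) (page_range : Option String) (pages : Option String) (step : Int) : Prop :=
  (page_range.getD "" ≠ "" →
    (pvSplit (page_range.getD "") "-").length = 2 ∧
    ∀ t ∈ pvSplit (page_range.getD "") "-", (PySem.Int.ofStr? t).isSome) ∧
  (∀ t ∈ pvSplit (pages.getD "") ",",
    PySem.Str.strip t ≠ "" → (PySem.Int.ofStr? (PySem.Str.strip t)).isSome)

instance (total_pages : Int) (page_range : Option String) (pages : Option String) (step : Int) : Decidable (Pre_select_pages total_pages page_range pages step) := by unfold Pre_select_pages; infer_instance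

def pvWitness_select_pages : Int × Option String × Option String × Int := (10, some "2-5", some "1,8", 1)

def Spec_select_pages (total_pages : Int) (page_range : Option String) (pages : Option String) (step : Int) (out : List Int) : Prop := out = select_pages_alt total_pages page_range pages step
instance (total_pages : Int) (page_range : Option String) (pages : Option String) (step : Int) (out : List Int) : Decidable (Spec_select_pages total_pages page_range pages step out) := by unfold Spec_select_pages; infer_instance

-- ===== CLAIM (what is proved, stated in full; the proofs are below) =====
def Claim_equal_select_pages : Prop := ∀ (total_pages : Int) (page_range : Option String) (pages : Option String) (step : Int), Dom_select_pages total_pages page_range pages step → Pre_select_pages total_pages page_range pages step → Spec_select_pages total_pages page_range pages step (select_pages total_pages page_range pages step)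

-- ===== LEMMAS AND PROOFS =====

-- proof-only view of A's range step: the parsed (0-based start, exclusive 1-based end), unclipped
def pvBounds (prS : String) : Option (Int × Int) :=
  if prS = "" then none else
    match pvSplit prS "-" with
    | [a, b] =>
      match PySem.Int.ofStr? a, PySem.Int.ofStr? b with
      | some av, some bv => some (max 1 av - 1, bv)
      | _, _ => none
    | _ => none

-- the value a pages-token contributes (none = blank token, or unparsable — excluded by Pre_)
def pvVal? (tok : String) : Option Int :=
  if PySem.Str.strip tok = "" then none
  else (PySem.Int.ofStr? (PySem.Str.strip tok)).map (fun v => max 0 (v - 1))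

theorem pvStepA_none (ch : PySem.Set Int) (tok : String) (h : pvVal? tok = none) :
    pvStepA ch tok = ch := by
  simp only [pvStepA, pvVal?] at *
  split_ifs at h ⊢ with h1
  · rfl
  · cases hv : PySem.Int.ofStr? (PySem.Str.strip tok) <;> simp [hv] at h ⊢

theorem pvStepA_some (ch : PySem.Set Int) (tok : String) (v : Int) (h : pvVal? tok = some v) :
    pvStepA ch tok = PySem.Set.add ch v := by
  simp only [pvStepA, pvVal?] at *
  split_ifs at h ⊢ with h1
  rw [Option.map_eq_some_iff] at h
  obtain ⟨a, ha, hav⟩ := h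
  rw [ha, ← hav]

theorem pvStepB_none (acc : List Int) (tok : String) (h : pvVal? tok = none) :
    pvStepB acc tok = acc := by
  simp only [pvStepB, pvVal?] at *
  split_ifs at h ⊢ with h1
  · rfl
  · cases hv : PySem.Int.ofStr? (PySem.Str.strip tok) <;> simp [hv] at h ⊢

theorem pvStepB_some (acc : List Int) (tok : String) (v : Int) (h : pvVal? tok = some v) :
    pvStepB acc tok = acc ++ [v] := by
  simp only [pvStepB, pvVal?] at *
  split_ifs at h ⊢ with h1
  rw [Option.map_eq_some_iff] at h
  obtain ⟨a, ha, hav⟩ := h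
  rw [ha, ← hav]

theorem mem_foldl_stepA (L : List String) (ch : PySem.Set Int) (i : Int) :
    i ∈ L.foldl pvStepA ch ↔ i ∈ ch ∨ ∃ t ∈ L, pvVal? t = some i := by
  induction L generalizing ch with
  | nil => simp
  | cons hd tl ih =>
    cases h : pvVal? hd with
    | none =>
      rw [List.foldl_cons, pvStepA_none _ _ h, ih]
      simp only [List.mem_cons]
      constructor
      · rintro (hc | ⟨t, ht1, ht2⟩); · tauto
        exact Or.inr ⟨t, Or.inr ht1, ht2⟩
      · rintro (hc | ⟨t, (rfl | ht1), ht2⟩)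
        · tauto
        · rw [h] at ht2; cases ht2
        · exact Or.inr ⟨t, ht1, ht2⟩
    | some v =>
      rw [List.foldl_cons, pvStepA_some _ _ _ h, ih]
      simp only [PySem.Set.mem_add, List.mem_cons]
      constructor
      · rintro ((hc | rfl) | ht)
        · tauto
        · exact Or.inr ⟨hd, Or.inl rfl, h⟩
        · obtain ⟨t, ht1, ht2⟩ := ht; exact Or.inr ⟨t, Or.inr ht1, ht2⟩
      · rintro (hc | ⟨t, (rfl | ht1), ht2⟩)
        · tauto
        · rw [h] at ht2; exact Or.inl (Or.inr (Option.some.inj ht2).symm)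
        · exact Or.inr ⟨t, ht1, ht2⟩

theorem nodup_foldl_stepA (L : List String) (ch : PySem.Set Int) (h : ch.Nodup) :
    (L.foldl pvStepA ch).Nodup := by
  induction L generalizing ch with
  | nil => exact h
  | cons hd tl ih =>
    cases hv : pvVal? hd with
    | none => rw [List.foldl_cons, pvStepA_none _ _ hv]; exact ih ch h
    | some v =>
      rw [List.foldl_cons, pvStepA_some _ _ _ hv]
      exact ih _ (PySem.Set.nodup_add _ _ h)

theorem mem_foldl_stepB (L : List String) (acc : List Int) (i : Int) :
    i ∈ L.foldl pvStepB acc ↔ i ∈ acc ∨ ∃ t ∈ L, pvVal? t = some i := by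
  induction L generalizing acc with
  | nil => simp
  | cons hd tl ih =>
    cases h : pvVal? hd with
    | none =>
      rw [List.foldl_cons, pvStepB_none _ _ h, ih]
      simp only [List.mem_cons]
      constructor
      · rintro (hc | ⟨t, ht1, ht2⟩); · tauto
        exact Or.inr ⟨t, Or.inr ht1, ht2⟩
      · rintro (hc | ⟨t, (rfl | ht1), ht2⟩)
        · tauto
        · rw [h] at ht2; cases ht2
        · exact Or.inr ⟨t, ht1, ht2⟩
    | some v =>
      rw [List.foldl_cons, pvStepB_some _ _ _ h, ih]
      simp only [List.mem_append, List.mem_cons, List.not_mem_nil, or_false]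
      constructor
      · rintro ((hc | rfl) | ht)
        · tauto
        · exact Or.inr ⟨hd, Or.inl rfl, h⟩
        · obtain ⟨t, ht1, ht2⟩ := ht; exact Or.inr ⟨t, Or.inr ht1, ht2⟩
      · rintro (hc | ⟨t, (rfl | ht1), ht2⟩)
        · tauto
        · rw [h] at ht2; exact Or.inl (Or.inr (Option.some.inj ht2).symm)
        · exact Or.inr ⟨t, ht1, ht2⟩

theorem mem_pvExtra (pgS : String) (i : Int) :
    i ∈ pvExtra pgS ↔ ∃ t ∈ pvSplit pgS ",", pvVal? t = some i := by
  unfold pvExtra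
  split_ifs with h
  · subst h
    have hs : pvSplit "" "," = [""] := by decide
    have hv : pvVal? "" = none := by decide
    simp [hs, hv]
  · rw [mem_foldl_stepB]; simp

theorem mem_pvAddPages (ch : PySem.Set Int) (pgS : String) (i : Int) :
    i ∈ pvAddPages ch pgS ↔ i ∈ ch ∨ i ∈ pvExtra pgS := by
  unfold pvAddPages
  split_ifs with h
  · simp [pvExtra, h]
  · simp [mem_foldl_stepA, mem_pvExtra]

theorem nodup_pvAddPages (ch : PySem.Set Int) (pgS : String) (h : ch.Nodup) :
    (pvAddPages ch pgS).Nodup := by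
  unfold pvAddPages
  split_ifs with hh
  · exact h
  · exact nodup_foldl_stepA _ _ h

theorem pvAddRange_eq (ch : PySem.Set Int) (prS : String) :
    pvAddRange ch prS = match pvBounds prS with
      | some (lo, hi) => PySem.Set.update ch (PySem.List.pyRange lo hi 1)
      | none => ch := by
  unfold pvAddRange pvBounds
  split_ifs with h
  · rfl
  · cases hs : pvSplit prS "-" with
    | nil => rfl
    | cons a tl =>
      cases tl with
      | nil => rfl
      | cons b tl2 =>
        cases tl2 with
        | cons c tl3 => rfl
        | nil =>
          cases ha : PySem.Int.ofStr? a with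
          | none => simp [ha]
          | some av =>
            cases hb : PySem.Int.ofStr? b with
            | none => simp [ha, hb]
            | some bv => simp [ha, hb]

theorem mem_pvAddRange (ch : PySem.Set Int) (prS : String) (i : Int) :
    i ∈ pvAddRange ch prS ↔ i ∈ ch ∨ ∃ lo hi, pvBounds prS = some (lo, hi) ∧ lo ≤ i ∧ i < hi := by
  rw [pvAddRange_eq]
  cases hb : pvBounds prS with
  | none => simp
  | some p =>
    obtain ⟨lo, hi⟩ := p
    simp [PySem.Set.mem_update, PySem.List.mem_pyRange_one]

theorem nodup_pvAddRange (ch : PySem.Set Int) (prS : String) (h : ch.Nodup) :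
    (pvAddRange ch prS).Nodup := by
  rw [pvAddRange_eq]
  cases hb : pvBounds prS with
  | none => exact h
  | some p =>
    obtain ⟨lo, hi⟩ := p
    exact PySem.Set.nodup_update _ _ h

theorem mem_chosen (prS pgS : String) (i : Int) :
    i ∈ pvAddPages (pvAddRange PySem.Set.empty prS) pgS ↔
      (∃ lo hi, pvBounds prS = some (lo, hi) ∧ lo ≤ i ∧ i < hi) ∨ i ∈ pvExtra pgS := by
  rw [mem_pvAddPages, mem_pvAddRange]
  simp [PySem.Set.empty]

-- B's (lo, hi) in terms of A's parse: start clamped at 0 (a no-op), end clipped to [lo, total_pages]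
theorem pvLoHi_eq (prS : String) (tp : Int) :
    pvLoHi prS tp = match pvBounds prS with
      | some (lo, hi) => (lo, max lo (min tp hi))
      | none => (0, 0) := by
  unfold pvLoHi pvBounds
  split_ifs with h
  · rfl
  · cases hs : pvSplit prS "-" with
    | nil => rfl
    | cons a tl =>
      cases tl with
      | nil => rfl
      | cons b tl2 =>
        cases tl2 with
        | cons c tl3 => rfl
        | nil =>
          cases ha : PySem.Int.ofStr? a with
          | none => simp [ha]
          | some av =>
            cases hb : PySem.Int.ofStr? b with
            | none => simp [ha, hb]
            | some bv =>
              simp only [ha, hb]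
              have : max 0 (max 1 av - 1) = max 1 av - 1 := by omega
              rw [this]

theorem pvBounds_fst_nonneg (prS : String) (lo hi : Int) (h : pvBounds prS = some (lo, hi)) :
    0 ≤ lo := by
  unfold pvBounds at h
  split_ifs at h with h1
  cases hs : pvSplit prS "-" with
  | nil => rw [hs] at h; cases h
  | cons a tl =>
    cases tl with
    | nil => rw [hs] at h; cases h
    | cons b tl2 =>
      cases tl2 with
      | cons c tl3 => rw [hs] at h; cases h
      | nil =>
        rw [hs] at h
        cases ha : PySem.Int.ofStr? a with
        | none => simp [ha] at h
        | some av =>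
          cases hb : PySem.Int.ofStr? b with
          | none => simp [ha, hb] at h
          | some bv =>
            simp only [ha, hb, Option.some.injEq, Prod.mk.injEq] at h
            omega

-- B's split loop is a pair of set-insertions: (before, after) as ofList of the filtered vals
theorem foldl_stepSplit (tp lo hi : Int) (hlh : lo ≤ hi) (vals : List Int) (b a : List Int) :
    vals.foldl (pvStepSplit tp lo hi) (b, a) =
      (PySem.Set.update b (vals.filter (fun v => decide (0 ≤ v) && decide (v < tp) && decide (v < lo))),
       PySem.Set.update a (vals.filter (fun v => decide (0 ≤ v) && decide (v < tp) && decide (hi ≤ v)))) := by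
  induction vals generalizing b a with
  | nil => simp [PySem.Set.update]
  | cons v tl ih =>
    rw [List.foldl_cons, List.filter_cons, List.filter_cons]
    by_cases h0 : 0 ≤ v ∧ v < tp
    · by_cases hl : v < lo
      · have hnot : ¬ hi ≤ v := by omega
        have e1 : (decide (0 ≤ v) && decide (v < tp) && decide (v < lo)) = true := by
          simp [h0.1, h0.2, hl]
        have e2 : (decide (0 ≤ v) && decide (v < tp) && decide (hi ≤ v)) = false := by
          simp [hnot]
        rw [if_pos e1, if_neg (ne_true_of_eq_false e2)]
        by_cases hm : v ∈ b
        · have hstep : pvStepSplit tp lo hi (b, a) v = (b, a) := by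
            simp [pvStepSplit, h0.1, h0.2, hm, hnot]
          rw [hstep, ih, PySem.Set.update_cons, PySem.Set.add_of_mem hm]
        · have hstep : pvStepSplit tp lo hi (b, a) v = (b ++ [v], a) := by
            simp [pvStepSplit, h0.1, h0.2, hl, hm]
          rw [hstep, ih, PySem.Set.update_cons, PySem.Set.add_of_not_mem hm]
      · have e1 : (decide (0 ≤ v) && decide (v < tp) && decide (v < lo)) = false := by
          simp [hl]
        by_cases hh : hi ≤ v
        · have e2 : (decide (0 ≤ v) && decide (v < tp) && decide (hi ≤ v)) = true := by
            simp [h0.1, h0.2, hh]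
          rw [if_neg (ne_true_of_eq_false e1), if_pos e2]
          by_cases hm : v ∈ a
          · have hstep : pvStepSplit tp lo hi (b, a) v = (b, a) := by
              simp [pvStepSplit, h0.1, h0.2, hl, hm]
            rw [hstep, ih, PySem.Set.update_cons, PySem.Set.add_of_mem hm]
          · have hstep : pvStepSplit tp lo hi (b, a) v = (b, a ++ [v]) := by
              simp [pvStepSplit, h0.1, h0.2, hl, hh, hm]
            rw [hstep, ih, PySem.Set.update_cons, PySem.Set.add_of_not_mem hm]
        · have e2 : (decide (0 ≤ v) && decide (v < tp) && decide (hi ≤ v)) = false := by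
            simp [hh]
          rw [if_neg (ne_true_of_eq_false e1), if_neg (ne_true_of_eq_false e2)]
          have hstep : pvStepSplit tp lo hi (b, a) v = (b, a) := by
            simp [pvStepSplit, h0.1, h0.2, hl, hh]
          rw [hstep, ih]
    · have e0 : ∀ (c : Bool), (decide (0 ≤ v) && decide (v < tp) && c) = false := by
        intro c
        rcases not_and_or.mp h0 with h | h <;> simp [h]
      rw [if_neg (ne_true_of_eq_false (e0 _)), if_neg (ne_true_of_eq_false (e0 _))]
      have hstep : pvStepSplit tp lo hi (b, a) v = (b, a) := by
        simp [pvStepSplit, h0]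
      rw [hstep, ih]

-- set(xs) keeps a subsequence of xs …
theorem ofList_sublist (xs : List Int) : (PySem.Set.ofList xs).Sublist xs := by
  induction xs with
  | nil => simp [PySem.Set.ofList]
  | cons x tl ih =>
    rw [PySem.Set.ofList_cons]
    exact List.Sublist.cons₂ x ((List.filter_sublist).trans ih)
-- … so set(xs) of a ≤-sorted xs is strictly increasing
theorem pairwise_lt_ofList (xs : List Int) (h : xs.Pairwise (· ≤ ·)) :
    (PySem.Set.ofList xs).Pairwise (· < ·) := by
  have hle := List.Pairwise.sublist (ofList_sublist xs) h
  have hnd : (PySem.Set.ofList xs).Pairwise (· ≠ ·) := PySem.Set.nodup_ofList xs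
  exact (hle.and hnd).imp (fun hab => lt_of_le_of_ne hab.1 hab.2)

theorem pyRange_zero_max (tp : Int) :
    PySem.List.pyRange 0 tp 1 = PySem.List.pyRange 0 (max 0 tp) 1 := by
  rcases le_total tp 0 with h | h
  · rw [PySem.List.pyRange_one_eq_nil h, PySem.List.pyRange_one_eq_nil (by omega)]
  · rw [max_eq_right h]

-- core: A's sorted filtered set = B's spliced merge, for any legal parse outcome
theorem idx_main (tp : Int) (prS pgS : String) :
    PySem.List.sorted
      ((if prS = "" ∧ pgS = "" then
          PySem.Set.update (pvAddPages (pvAddRange PySem.Set.empty prS) pgS) (PySem.List.pyRange 0 tp 1)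
        else pvAddPages (pvAddRange PySem.Set.empty prS) pgS).filter
        (fun i => decide (0 ≤ i) && decide (i < tp))) (fun x => x) false
    = if prS = "" ∧ pgS = "" then PySem.List.pyRange 0 (max 0 tp) 1
      else
        ((PySem.List.sorted (pvExtra pgS) (fun x => x) false).foldl
            (pvStepSplit tp (pvLoHi prS tp).1 (pvLoHi prS tp).2) ([], [])).1 ++
          PySem.List.pyRange (pvLoHi prS tp).1 (pvLoHi prS tp).2 1 ++
          ((PySem.List.sorted (pvExtra pgS) (fun x => x) false).foldl
            (pvStepSplit tp (pvLoHi prS tp).1 (pvLoHi prS tp).2) ([], [])).2 := by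
  by_cases hta : prS = "" ∧ pgS = ""
  · obtain ⟨h1, h2⟩ := hta
    subst h1; subst h2
    rw [if_pos ⟨rfl, rfl⟩, if_pos ⟨rfl, rfl⟩]
    have hr : pvAddPages (pvAddRange PySem.Set.empty "") "" = PySem.Set.empty := rfl
    rw [hr, PySem.Set.update_empty,
      PySem.Set.ofList_eq_self_of_nodup _ (PySem.List.nodup_pyRange_one 0 tp)]
    have hf : (PySem.List.pyRange 0 tp 1).filter (fun i => decide (0 ≤ i) && decide (i < tp))
        = PySem.List.pyRange 0 tp 1 := by
      rw [List.filter_eq_self]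
      intro i hi
      rw [PySem.List.mem_pyRange_one] at hi
      simp only [Bool.and_eq_true, decide_eq_true_eq]
      exact ⟨hi.1, hi.2⟩
    rw [hf, PySem.List.sorted_eq_self_of_pairwise _ _
      ((PySem.List.pairwise_lt_pyRange_one 0 tp).imp le_of_lt), pyRange_zero_max]
  · rw [if_neg hta, if_neg hta]
    -- name the pieces
    set lo := (pvLoHi prS tp).1 with hlo
    set hi := (pvLoHi prS tp).2 with hhi
    have hlh : lo ≤ hi ∧ 0 ≤ lo := by
      rw [hlo, hhi, pvLoHi_eq]
      cases hb : pvBounds prS with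
      | none => simp
      | some p =>
        obtain ⟨l, h⟩ := p
        have := pvBounds_fst_nonneg prS l h hb
        simp only
        omega
    have hsp := foldl_stepSplit tp lo hi hlh.1
      (PySem.List.sorted (pvExtra pgS) (fun x => x) false) [] []
    rw [hsp]
    simp only [PySem.Set.update_nil_left]
    have hple : (PySem.List.sorted (pvExtra pgS) (fun x => x) false).Pairwise (· ≤ ·) :=
      PySem.List.sorted_pairwise (pvExtra pgS) (fun x => x)
    apply PySem.List.sorted_eq_of_perm_of_pairwise_lt
    · -- the merge is a permutation of A's filtered set
      have ndchosen : (pvAddPages (pvAddRange PySem.Set.empty prS) pgS).Nodup :=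
        nodup_pvAddPages _ _ (nodup_pvAddRange _ _ List.nodup_nil)
      have ndB : (PySem.Set.ofList ((PySem.List.sorted (pvExtra pgS) (fun x => x) false).filter
          (fun v => decide (0 ≤ v) && decide (v < tp) && decide (v < lo)))).Nodup :=
        PySem.Set.nodup_ofList _
      have ndA2 : (PySem.Set.ofList ((PySem.List.sorted (pvExtra pgS) (fun x => x) false).filter
          (fun v => decide (0 ≤ v) && decide (v < tp) && decide (hi ≤ v)))).Nodup :=
        PySem.Set.nodup_ofList _
      have ndys : (PySem.Set.ofList ((PySem.List.sorted (pvExtra pgS) (fun x => x) false).filter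
            (fun v => decide (0 ≤ v) && decide (v < tp) && decide (v < lo))) ++
          PySem.List.pyRange lo hi 1 ++
          PySem.Set.ofList ((PySem.List.sorted (pvExtra pgS) (fun x => x) false).filter
            (fun v => decide (0 ≤ v) && decide (v < tp) && decide (hi ≤ v)))).Nodup := by
        rw [List.nodup_append, List.nodup_append]
        refine ⟨⟨ndB, PySem.List.nodup_pyRange_one lo hi, ?_⟩, ndA2, ?_⟩
        · intro x hx y hy
          rw [PySem.Set.mem_ofList, List.mem_filter] at hx
          rw [PySem.List.mem_pyRange_one] at hy
          simp only [Bool.and_eq_true, decide_eq_true_eq] at hx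
          omega
        · intro x hx y hy
          rw [PySem.Set.mem_ofList, List.mem_filter] at hy
          simp only [Bool.and_eq_true, decide_eq_true_eq] at hy
          rw [List.mem_append] at hx
          rcases hx with hx | hx
          · rw [PySem.Set.mem_ofList, List.mem_filter] at hx
            simp only [Bool.and_eq_true, decide_eq_true_eq] at hx
            omega
          · rw [PySem.List.mem_pyRange_one] at hx
            omega
      rw [List.perm_ext_iff_of_nodup ndys (ndchosen.filter _)]
      intro i
      rw [List.mem_append, List.mem_append, List.mem_filter, mem_chosen,
        PySem.Set.mem_ofList, PySem.Set.mem_ofList, List.mem_filter, List.mem_filter,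
        PySem.List.mem_sorted, PySem.List.mem_pyRange_one]
      simp only [Bool.and_eq_true, decide_eq_true_eq]
      rw [hlo, hhi, pvLoHi_eq]
      cases hb : pvBounds prS with
      | none =>
        simp only [reduceCtorEq, false_and, exists_false, false_or]
        constructor
        · rintro ((⟨he, ⟨h0, h1⟩, h2⟩ | ⟨h0, h1⟩) | ⟨he, ⟨h0, h1⟩, h2⟩) <;>
            first | omega | exact ⟨he, h0, h1⟩
        · rintro ⟨he, h0, h1⟩
          exact Or.inr ⟨he, ⟨h0, h1⟩, by omega⟩
      | some p =>
        obtain ⟨l, hgh⟩ := p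
        have hl0 := pvBounds_fst_nonneg prS l hgh hb
        simp only [Option.some.injEq, Prod.mk.injEq]
        constructor
        · rintro ((⟨he, ⟨h0, h1⟩, h2⟩ | ⟨h0, h1⟩) | ⟨he, ⟨h0, h1⟩, h2⟩)
          · exact ⟨Or.inr he, h0, h1⟩
          · exact ⟨Or.inl ⟨l, hgh, ⟨rfl, rfl⟩, by omega, by omega⟩, by omega, by omega⟩
          · exact ⟨Or.inr he, h0, h1⟩
        · rintro ⟨(⟨l', h', ⟨rfl, rfl⟩, hr1, hr2⟩ | he), h0, h1⟩
          · exact Or.inl (Or.inr ⟨by omega, by omega⟩)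
          · by_cases hcase : l ≤ i ∧ i < max l (min tp hgh)
            · exact Or.inl (Or.inr hcase)
            · rcases lt_or_ge i l with hil | hil
              · exact Or.inl (Or.inl ⟨he, ⟨h0, h1⟩, hil⟩)
              · exact Or.inr ⟨he, ⟨h0, h1⟩, by omega⟩
    · -- the merge is strictly increasing
      rw [List.pairwise_append, List.pairwise_append]
      refine ⟨⟨pairwise_lt_ofList _ (hple.filter _),
        PySem.List.pairwise_lt_pyRange_one lo hi, ?_⟩,
        pairwise_lt_ofList _ (hple.filter _), ?_⟩
      · intro x hx y hy
        rw [PySem.Set.mem_ofList, List.mem_filter] at hx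
        rw [PySem.List.mem_pyRange_one] at hy
        simp only [Bool.and_eq_true, decide_eq_true_eq] at hx
        omega
      · intro x hx y hy
        rw [PySem.Set.mem_ofList, List.mem_filter] at hy
        simp only [Bool.and_eq_true, decide_eq_true_eq] at hy
        rw [List.mem_append] at hx
        rcases hx with hx | hx
        · rw [PySem.Set.mem_ofList, List.mem_filter] at hx
          simp only [Bool.and_eq_true, decide_eq_true_eq] at hx
          omega
        · rw [PySem.List.mem_pyRange_one] at hx
          omega

-- ===== VERDICT (by name: the statement is the Claim_ definition above) =====
theorem select_pages_spec : Claim_equal_select_pages := by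
  intro tp pr pg st _ _
  unfold Spec_select_pages
  simp only [select_pages, select_pages_alt]
  rw [idx_main tp (pr.getD "") (pg.getD "")]
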